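-- pv_equiv track=rewrite | github.com/RirnelHH/CS224N | asiignment_1/Part_one.py | distinct_words
-- ===== SOURCE A (Python) =====
-- def distinct_words(corpus):
--     corpus_words = []
--     num_corpus_words = -1
--     reposity_corpus = set()
--
--     for sentence in corpus:
--         reposity_corpus  = reposity_corpus.union(set(sentence))
--
--     corpus_words = list(reposity_corpus)
--     num_corpus_words = len(corpus_words)
--     corpus_words = sorted(corpus_words)
--
--     return corpus_words, num_corpus_words
-- ===== SOURCE B (Python) =====
-- def distinct_words(corpus):
--     all_words = []
--     for sentence in corpus:
--         all_words.extend(sentence)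
--     all_words.sort()
--     corpus_words = []
--     prev = None
--     for w in all_words:
--         if prev is None or w != prev:
--             corpus_words.append(w)
--             prev = w
--     return corpus_words, len(corpus_words)
-- ===== Notes on version B (the rewrite author's own statement) =====
-- stated objective: faster
-- what changed: Replaces the per-sentence set construction and unions with flatten + sort + one adjacent-duplicate removal pass, so no set is maintained at all.
import Mathlib
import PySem

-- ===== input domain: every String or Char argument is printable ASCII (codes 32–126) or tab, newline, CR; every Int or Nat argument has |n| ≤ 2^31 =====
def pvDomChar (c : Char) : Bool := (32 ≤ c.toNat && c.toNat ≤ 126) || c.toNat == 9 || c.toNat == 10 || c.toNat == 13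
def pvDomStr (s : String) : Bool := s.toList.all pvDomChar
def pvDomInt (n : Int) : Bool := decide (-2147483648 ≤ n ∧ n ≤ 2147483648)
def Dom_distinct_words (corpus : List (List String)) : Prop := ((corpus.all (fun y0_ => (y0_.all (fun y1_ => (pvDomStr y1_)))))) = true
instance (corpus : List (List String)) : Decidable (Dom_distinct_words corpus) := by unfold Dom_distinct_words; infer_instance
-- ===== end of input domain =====

-- B replaces A's per-sentence set unions with flatten + sort + one adjacent-duplicate
-- removal pass (no set maintained); equal return value proved on the whole domain.


-- ===== PORT A =====
-- for sentence in corpus: reposity_corpus = reposity_corpus.union(set(sentence))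
-- corpus_words = list(reposity_corpus); num = len(corpus_words); corpus_words = sorted(corpus_words)
-- (list(set) iteration order is consumed only by len and a key-less sorted, so the result is order-independent)
def distinct_words (corpus : List (List String)) : List String × Int :=
  let reposity : PySem.Set String :=
    corpus.foldl (fun s sentence => PySem.Set.union s (PySem.Set.ofList sentence)) PySem.Set.empty
  let corpus_words : List String := reposity
  let num_corpus_words : Int := corpus_words.length
  let corpus_words := PySem.List.sorted corpus_words (fun x => x) false
  (corpus_words, num_corpus_words)

-- ===== PORT B =====
-- the 'for w in all_words: if prev is None or w != prev: append w; prev = w' loop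
def distinct_words_alt (corpus : List (List String)) : List String × Int :=
  let all_words : List String := corpus.foldl (fun acc sentence => acc ++ sentence) []
  let all_words := PySem.List.sorted all_words (fun x => x) false
  let st := all_words.foldl
      (fun (st : List String × Option String) w =>
        if st.2 = none ∨ some w ≠ st.2 then (st.1 ++ [w], some w) else st)
      ([], none)
  (st.1, st.1.length)

-- ===== PRECONDITION & SPEC =====
def Spec_distinct_words (corpus : List (List String)) (out : List String × Int) : Prop := out = distinct_words_alt corpus
instance (corpus : List (List String)) (out : List String × Int) : Decidable (Spec_distinct_words corpus out) := by unfold Spec_distinct_words; infer_instance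

-- ===== CLAIM (what is proved, stated in full; the proofs are below) =====
def Claim_equal_distinct_words : Prop := ∀ (corpus : List (List String)), Dom_distinct_words corpus → Spec_distinct_words corpus (distinct_words corpus)

-- ===== LEMMAS AND PROOFS =====

-- structural form of B's dedup loop, used only by the proofs
def dedupFrom (p : String) : List String → List String
  | [] => []
  | w :: ws => if w = p then dedupFrom p ws else w :: dedupFrom w ws

def dedupAdj : List String → List String
  | [] => []
  | w :: ws => w :: dedupFrom w ws

theorem foldl_dedup_from (l : List String) : ∀ (out : List String) (p : String),
    (l.foldl (fun (st : List String × Option String) w =>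
        if st.2 = none ∨ some w ≠ st.2 then (st.1 ++ [w], some w) else st)
      (out, some p)) = (out ++ dedupFrom p l, some ((p :: dedupFrom p l).getLast (by simp))) := by
  induction l with
  | nil => intro out p; simp [dedupFrom]
  | cons w ws ih =>
    intro out p
    by_cases h : w = p
    · subst h
      simp [dedupFrom, List.foldl_cons, ih out w]
    · simp only [List.foldl_cons]
      rw [if_pos (by simp; exact fun hh => absurd hh h)]
      simp [dedupFrom, h, ih (out ++ [w]) w]

theorem foldl_dedup (l : List String) :
    (l.foldl (fun (st : List String × Option String) w =>
        if st.2 = none ∨ some w ≠ st.2 then (st.1 ++ [w], some w) else st)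
      ([], none)).1 = dedupAdj l := by
  cases l with
  | nil => rfl
  | cons w ws => simp [dedupAdj, List.foldl_cons, foldl_dedup_from ws [w] w]

theorem mem_dedupFrom_of_mem {x p : String} {l : List String}
    (hx : x ∈ l) : x = p ∨ x ∈ dedupFrom p l := by
  induction l generalizing p with
  | nil => cases hx
  | cons w ws ih =>
    rcases List.mem_cons.mp hx with h | h
    · subst h
      by_cases hw : x = p
      · exact Or.inl hw
      · exact Or.inr (by simp [dedupFrom, hw])
    · by_cases hw : w = p
      · subst hw; exact (ih h).imp id (by simp [dedupFrom])
      · rcases ih (p := w) h with h2 | h2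
        · exact Or.inr (by simp [dedupFrom, hw, h2])
        · exact Or.inr (by simp [dedupFrom, hw, h2])

theorem mem_of_mem_dedupFrom {x p : String} {l : List String}
    (hx : x ∈ dedupFrom p l) : x ∈ l := by
  induction l generalizing p with
  | nil => simp [dedupFrom] at hx
  | cons w ws ih =>
    by_cases hw : w = p
    · simp only [dedupFrom, if_pos hw] at hx
      exact List.mem_cons_of_mem _ (ih hx)
    · simp only [dedupFrom, if_neg hw, List.mem_cons] at hx
      rcases hx with h | h
      · exact h ▸ List.mem_cons_self
      · exact List.mem_cons_of_mem _ (ih h)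

theorem mem_dedupAdj {x : String} {l : List String} : x ∈ dedupAdj l ↔ x ∈ l := by
  cases l with
  | nil => simp [dedupAdj]
  | cons w ws =>
    constructor
    · intro h
      rcases List.mem_cons.mp h with h | h
      · exact h ▸ List.mem_cons_self
      · exact List.mem_cons_of_mem _ (mem_of_mem_dedupFrom h)
    · intro h
      rcases List.mem_cons.mp h with h | h
      · exact h ▸ List.mem_cons_self
      · rcases mem_dedupFrom_of_mem (p := w) h with h2 | h2
        · exact h2 ▸ List.mem_cons_self
        · exact List.mem_cons_of_mem _ h2

theorem dedupFrom_pairwise {p : String} {l : List String}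
    (h : (p :: l).Pairwise (· ≤ ·)) :
    (dedupFrom p l).Pairwise (· < ·) ∧ ∀ y ∈ dedupFrom p l, p < y := by
  induction l generalizing p with
  | nil => simp [dedupFrom]
  | cons w ws ih =>
    rcases List.pairwise_cons.mp h with ⟨hp, hws⟩
    by_cases hw : w = p
    · subst hw
      have h' : (w :: ws).Pairwise (· ≤ ·) := hws
      simpa [dedupFrom] using ih h'
    · have hpw : p < w := lt_of_le_of_ne (hp w List.mem_cons_self) (Ne.symm hw)
      rcases ih (p := w) hws with ⟨h1, h2⟩
      refine ⟨?_, ?_⟩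
      · simp only [dedupFrom, if_neg hw]
        exact List.pairwise_cons.mpr ⟨h2, h1⟩
      · intro y hy
        simp only [dedupFrom, if_neg hw, List.mem_cons] at hy
        rcases hy with h | h
        · exact h ▸ hpw
        · exact lt_trans hpw (h2 y h)

theorem dedupAdj_pairwise {l : List String} (h : l.Pairwise (· ≤ ·)) :
    (dedupAdj l).Pairwise (· < ·) := by
  cases l with
  | nil => simp [dedupAdj]
  | cons w ws =>
    rcases dedupFrom_pairwise h with ⟨h1, h2⟩
    exact List.pairwise_cons.mpr ⟨h2, h1⟩

theorem mem_foldl_union {x : String} (corpus : List (List String)) :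
    ∀ (s : PySem.Set String),
    (x ∈ corpus.foldl (fun s sentence => PySem.Set.union s (PySem.Set.ofList sentence)) s ↔
      x ∈ s ∨ ∃ sent ∈ corpus, x ∈ sent) := by
  induction corpus with
  | nil => intro s; simp
  | cons c cs ih =>
    intro s
    simp [List.foldl_cons, ih, PySem.Set.mem_union, PySem.Set.mem_ofList, or_assoc]

theorem nodup_foldl_union (corpus : List (List String)) :
    ∀ (s : PySem.Set String), s.Nodup →
    (corpus.foldl (fun s sentence => PySem.Set.union s (PySem.Set.ofList sentence)) s).Nodup := by
  induction corpus with
  | nil => intro s hs; exact hs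
  | cons c cs ih =>
    intro s hs
    exact ih _ (PySem.Set.nodup_union s (PySem.Set.ofList c) hs)

theorem mem_foldl_append {x : String} (corpus : List (List String)) :
    ∀ (acc : List String),
    (x ∈ corpus.foldl (fun acc sentence => acc ++ sentence) acc ↔
      x ∈ acc ∨ ∃ sent ∈ corpus, x ∈ sent) := by
  induction corpus with
  | nil => intro acc; simp
  | cons c cs ih =>
    intro acc
    simp [List.foldl_cons, ih, List.mem_append, or_assoc]

-- ===== VERDICT (by name: the statement is the Claim_ definition above) =====
theorem distinct_words_spec : Claim_equal_distinct_words := by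
  intro corpus _
  unfold Spec_distinct_words distinct_words distinct_words_alt
  simp only []
  rw [foldl_dedup]
  set S : PySem.Set String :=
    corpus.foldl (fun s sentence => PySem.Set.union s (PySem.Set.ofList sentence)) PySem.Set.empty with hS
  set F : List String := corpus.foldl (fun acc sentence => acc ++ sentence) [] with hF
  have hSnodup : S.Nodup := nodup_foldl_union corpus _ List.nodup_nil
  have hDpairs : (dedupAdj (PySem.List.sorted F (fun x => x) false)).Pairwise (· < ·) :=
    dedupAdj_pairwise (PySem.List.sorted_pairwise F (fun x => x))
  have hDnodup : (dedupAdj (PySem.List.sorted F (fun x => x) false)).Nodup :=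
    hDpairs.imp (fun h => ne_of_lt h)
  have hmem : ∀ x : String, x ∈ dedupAdj (PySem.List.sorted F (fun x => x) false) ↔ x ∈ S := by
    intro x
    rw [mem_dedupAdj, PySem.List.mem_sorted, hF, hS, mem_foldl_append, mem_foldl_union]
    simp [PySem.Set.empty]
  have hperm : (dedupAdj (PySem.List.sorted F (fun x => x) false)).Perm S :=
    (List.perm_ext_iff_of_nodup hDnodup hSnodup).mpr hmem
  have hsorted : PySem.List.sorted S (fun x => x) false
      = dedupAdj (PySem.List.sorted F (fun x => x) false) :=
    PySem.List.sorted_eq_of_perm_of_pairwise_lt S _ (fun x => x) hperm hDpairs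
  refine Prod.ext ?_ ?_
  · exact hsorted
  · simp only
    rw [hsorted.symm, PySem.List.length_sorted]
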